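-- pv_equiv track=rewrite | github.com/wheejoo/Programmers_code_study | 02 해시 스택/Lv2_쇠막대기.py | solution
-- ===== SOURCE A (Python) =====
-- def solution(arrangement):
--     answer = 0
--     stack = []
--
--     for i in range(len(arrangement)):
--         if arrangement[i] == '(':
--             stack.append('(')
--         else:
--             stack.pop()
--             if arrangement[i-1] == '(':
--                 answer += len(stack)
--             else:
--                 answer += 1
--     return answer
-- ===== SOURCE B (Python) =====
-- def solution(arrangement):
--     # Stackless counter: consume tokens (a laser "(x" = '(' followed by any
--     # non-'(' cuts every open bar; a lone '(' opens a bar; any other char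
--     # closes one bar), keeping only the number of open bars.
--     answer = 0
--     open_bars = 0
--     i, n = 0, len(arrangement)
--     while i < n:
--         if arrangement[i] == '(':
--             if i + 1 < n and arrangement[i + 1] != '(':
--                 answer += open_bars   # laser: cuts every currently open bar
--                 i += 2
--             else:
--                 open_bars += 1        # a new bar opens
--                 i += 1
--         else:
--             if open_bars == 0:
--                 raise ValueError("unmatched close at index %d" % i)
--             open_bars -= 1            # a bar ends: one final piece
--             answer += 1
--             i += 1
--     return answer
-- ===== Notes on version B (the rewrite author's own statement) =====
-- stated objective: simpler
-- what changed: B drops A's stack and arrangement[i-1] lookback: a while loop consumes one or two characters per step (laser pair / bar-open / bar-close) and keeps only an integer count of open bars (O(1) space), raising ValueError on an unmatched close where A's stack.pop() raises IndexError.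
import Mathlib
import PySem

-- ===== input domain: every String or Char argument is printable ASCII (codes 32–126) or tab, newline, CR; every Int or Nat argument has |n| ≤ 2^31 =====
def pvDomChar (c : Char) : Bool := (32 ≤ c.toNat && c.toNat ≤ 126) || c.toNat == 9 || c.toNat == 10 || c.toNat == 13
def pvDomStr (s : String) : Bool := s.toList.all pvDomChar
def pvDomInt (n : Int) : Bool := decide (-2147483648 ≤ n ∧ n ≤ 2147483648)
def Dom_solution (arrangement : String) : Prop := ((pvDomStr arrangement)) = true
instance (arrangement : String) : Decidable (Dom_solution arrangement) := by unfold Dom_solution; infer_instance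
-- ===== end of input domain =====

-- B replaces A's stack-and-lookback scan by a stackless token consumer: it reads one or two
-- characters at a time (laser / bar-open / bar-close) and keeps only an integer counter of
-- open bars (objective: simpler; no speed claim).

-- ===== PORT A =====
-- A's loop body: state none = an IndexError already raised (stack.pop() on an empty list).
def bodyA (cs : List Char) (st : Option (Int × List Char)) (i : Int) : Option (Int × List Char) :=
  match st with
  | none => none
  | some (answer, stack) =>
    if PySem.List.pyGetD cs i ' ' = '(' then
      some (answer, stack ++ ['('])
    else
      match PySem.List.pop? stack (-1) with
      | none => none
      | some (_, stack') =>
        if PySem.List.pyGetD cs (i - 1) ' ' = '(' then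
          some (answer + (stack'.length : Int), stack')
        else
          some (answer + 1, stack')

def solution (arrangement : String) : Int :=
  match (PySem.List.pyRange 0 (arrangement.toList.length : Int) 1).foldl
      (bodyA arrangement.toList) (some (0, [])) with
  | none => 0
  | some (answer, _) => answer

-- ===== PORT B =====
-- B's while loop: consume one or two characters per step, carrying (answer, open_bars);
-- none = the ValueError B raises on an unmatched close.
def goB : List Char → Int → Int → Option Int
  | [], answer, _ => some answer
  | c :: rest, answer, openBars =>
    if c = '(' then
      match rest with
      | d :: rest' =>
        if d ≠ '(' then goB rest' (answer + openBars) openBars   -- laser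
        else goB (d :: rest') answer (openBars + 1)              -- bar opens
      | [] => goB [] answer (openBars + 1)                       -- bar opens at the end
    else
      if openBars = 0 then none                                  -- ValueError
      else goB rest (answer + 1) (openBars - 1)                  -- bar ends

def solution_alt (arrangement : String) : Int :=
  match goB arrangement.toList 0 0 with
  | none => 0
  | some answer => answer

-- ===== PRECONDITION & SPEC =====
-- Pre_ excludes exactly the inputs on which A raises IndexError: some non-'(' character is
-- reached while no '(' is pending (stack.pop() on an empty list).
def Pre_solution (arrangement : String) : Prop :=
  ∀ j, j < arrangement.toList.length → arrangement.toList.getD j ' ' ≠ '(' →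
    (j : Int) < 2 * ((arrangement.toList.take j).count '(' : Int)
instance (arrangement : String) : Decidable (Pre_solution arrangement) := by
  unfold Pre_solution; infer_instance

def pvWitness_solution : String := "()(())"

def Spec_solution (arrangement : String) (out : Int) : Prop := out = solution_alt arrangement
instance (arrangement : String) (out : Int) : Decidable (Spec_solution arrangement out) := by unfold Spec_solution; infer_instance

-- ===== CLAIM (what is proved, stated in full; the proofs are below) =====
def Claim_equal_solution : Prop := ∀ (arrangement : String), Dom_solution arrangement → Pre_solution arrangement → Spec_solution arrangement (solution arrangement)

-- ===== LEMMAS AND PROOFS =====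

lemma loop_eq : ∀ (n : Nat) (suf pre : List Char) (ans : Int) (stack : List Char),
    suf.length ≤ n →
    ((stack.length : Int) = 2 * (pre.count '(' : Int) - (pre.length : Int)) →
    (pre.getLast? = some '(' → suf.head? = some '(') →
    (∀ j, j < suf.length → suf.getD j ' ' ≠ '(' →
      ((pre.length : Int) + (j : Int)) < 2 * ((pre.count '(' : Int) + ((suf.take j).count '(' : Int))) →
    ∃ a st,
      (PySem.List.pyRange (pre.length : Int) ((pre.length : Int) + (suf.length : Int)) 1).foldl
          (bodyA (pre ++ suf)) (some (ans, stack)) = some (a, st) ∧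
      goB suf ans (stack.length : Int) = some a := by
  intro n
  induction n with
  | zero =>
    intro suf pre ans stack hn hd H hP
    have hs : suf = [] := by cases suf <;> simp_all
    subst hs
    refine ⟨ans, stack, ?_, by simp [goB]⟩
    simp only [List.length_nil, Nat.cast_zero, add_zero]
    rw [PySem.List.pyRange_one_eq_nil (le_refl _)]
    rfl
  | succ n ih =>
    intro suf pre ans stack hn hd H hP
    cases suf with
    | nil =>
      refine ⟨ans, stack, ?_, by simp [goB]⟩
      simp only [List.length_nil, Nat.cast_zero, add_zero]
      rw [PySem.List.pyRange_one_eq_nil (le_refl _)]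
      rfl
    | cons c rest =>
      have hc0 : PySem.List.pyGetD (pre ++ c :: rest) ((pre.length : Nat) : Int) ' ' = c := by
        rw [PySem.List.pyGetD_natCast]
        simp [List.getD]
      have hlt : (pre.length : Int) < (pre.length : Int) + ((c :: rest).length : Int) := by
        simp only [List.length_cons]; push_cast; omega
      by_cases hc : c = '('
      · subst hc
        cases rest with
        | nil =>
          -- suf = ['(']: A pushes, B bumps the counter; both then finish with ans
          refine ⟨ans, stack ++ ['('], ?_, ?_⟩
          · rw [show ((pre.length : Int) + ((List.length ['(']) : Int)) = (pre.length : Int) + 1 by simp]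
            rw [PySem.List.pyRange_one_singleton]
            simp only [List.foldl_cons, List.foldl_nil]
            simp [bodyA, hc0]
          · simp [goB]
        | cons d t =>
          have hstep : bodyA (pre ++ '(' :: d :: t) (some (ans, stack)) ((pre.length : Nat) : Int)
              = some (ans, stack ++ ['(']) := by
            simp [bodyA, hc0]
          by_cases hdo : d = '('
          · -- next char opens again: a lone bar-open on both sides
            rw [PySem.List.pyRange_one_cons hlt, List.foldl_cons, hstep]
            obtain ⟨a, st, hA, hB⟩ := ih (d :: t) (pre ++ ['(']) ans (stack ++ ['('])
              (by simp at hn ⊢; omega)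
              (by simp [List.count_append]; omega)
              (fun _ => by simp [hdo])
              (by
                intro j hj hne
                have h := hP (j+1) (by simpa using Nat.succ_lt_succ hj) (by simpa using hne)
                simp only [List.take_succ_cons, List.count_cons, List.count_append, List.length_append,
                  List.length_cons, List.length_nil] at h ⊢
                push_cast at h ⊢
                omega)
            refine ⟨a, st, ?_, ?_⟩
            · simp only [List.length_append, List.length_cons, List.length_nil, List.append_assoc,
                List.singleton_append, Nat.cast_add, Nat.cast_one, zero_add] at hA
              simp only [List.length_cons, Nat.cast_add, Nat.cast_one]
              rw [show ((pre.length : Int) + ((t.length : Int) + 1 + 1)) = (pre.length : Int) + 1 + ((t.length : Int) + 1) by ring]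
              exact hA
            · rw [goB]
              simp only [hdo, ne_eq, not_true_eq_false, reduceIte]
              simpa [hdo] using hB
          · -- laser "(x": two A steps (push, pop with '(' lookback), one B token
            rw [PySem.List.pyRange_one_cons hlt, List.foldl_cons, hstep]
            have hlt2' : (pre.length : Int) + 1 < (pre.length : Int) + ((('(' :: d :: t).length : Int)) := by
              simp only [List.length_cons]; push_cast; omega
            rw [PySem.List.pyRange_one_cons hlt2', List.foldl_cons]
            have hd1 : PySem.List.pyGetD (pre ++ '(' :: d :: t) ((pre.length : Int) + 1) ' ' = d := by
              rw [show ((pre.length : Int) + 1) = ((pre.length + 1 : Nat) : Int) by push_cast; ring]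
              rw [PySem.List.pyGetD_natCast]
              rw [List.getD_eq_getElem?_getD]
              rw [List.getElem?_append_right (by omega)]
              simp
            have hback : PySem.List.pyGetD (pre ++ '(' :: d :: t) ((pre.length : Int) + 1 - 1) ' ' = '(' := by
              rw [show ((pre.length : Int) + 1 - 1) = ((pre.length : Nat) : Int) by ring]
              exact hc0
            have hstep2 : bodyA (pre ++ '(' :: d :: t) (some (ans, stack ++ ['(']))
                ((pre.length : Int) + 1) = some (ans + (stack.length : Int), stack) := by
              simp only [bodyA, hd1, if_neg hdo, PySem.List.pop?_last, hback]
              simp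
            rw [hstep2]
            obtain ⟨a, st, hA, hB⟩ := ih t (pre ++ ['(', d]) (ans + (stack.length : Int)) stack
              (by simp at hn ⊢; omega)
              (by simp [List.count_append, hdo]; omega)
              (by
                intro h
                rw [show pre ++ ['(', d] = (pre ++ ['(']) ++ [d] by simp] at h
                rw [List.getLast?_concat] at h
                exact absurd (Option.some.injEq .. ▸ h) hdo)
              (by
                intro j hj hne
                have h := hP (j+2) (by simp; omega) (by simpa using hne)
                simp only [List.take_succ_cons, List.count_cons, List.count_append, List.length_append,
                  List.length_cons, List.length_nil] at h ⊢
                push_cast at h ⊢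
                simp [hdo] at h ⊢
                omega)
            refine ⟨a, st, ?_, ?_⟩
            · simp only [List.length_append, List.length_cons, List.length_nil, List.append_assoc,
                Nat.cast_add, Nat.cast_one, zero_add] at hA
              simp only [List.length_cons, Nat.cast_add, Nat.cast_one]
              rw [show ((pre.length : Int) + ((t.length : Int) + 1 + 1)) = (pre.length : Int) + 1 + 1 + (t.length : Int) by ring]
              simp only [List.cons_append, List.nil_append] at hA
              exact hA
            · rw [goB]
              simp only [ne_eq, hdo, not_false_eq_true, reduceIte]
              exact hB
      · -- c is not '(': A pops with a non-'(' lookback; B counts one piece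
        have h0 := hP 0 (by simp) (by simpa using hc)
        simp only [List.take_zero, List.count_nil, Nat.cast_zero, add_zero] at h0
        have hpos : 0 < stack.length := by
          have : (0 : Int) < (stack.length : Int) := by omega
          exact_mod_cast this
        have hne : stack ≠ [] := List.ne_nil_of_length_pos hpos
        have hpre : pre ≠ [] := by
          intro he; subst he; simp at h0
        have hprev : pre.getLast? = some (pre.getLast hpre) := List.getLast?_eq_some_getLast hpre
        have hlast : pre.getLast hpre ≠ '(' := by
          intro he
          have := H (by rw [hprev, he])
          simp at this
          exact hc this
        have hlp : 0 < pre.length := List.length_pos_of_ne_nil hpre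
        have hpop : PySem.List.pop? stack (-1) = some (stack.getLast hne, stack.dropLast) := by
          conv_lhs => rw [← List.dropLast_concat_getLast hne]
          exact PySem.List.pop?_last _ _
        have hidx : PySem.List.pyGetD (pre ++ c :: rest) (((pre.length : Nat) : Int) - 1) ' '
            = pre.getLast hpre := by
          rw [show ((pre.length : Int) - 1) = ((pre.length - 1 : Nat) : Int) by omega]
          rw [PySem.List.pyGetD_natCast]
          rw [List.getD_append _ _ _ _ (by omega)]
          rw [List.getLast_eq_getElem]
          exact List.getD_eq_getElem pre ' ' (by omega)
        have hstep : bodyA (pre ++ c :: rest) (some (ans, stack)) ((pre.length : Nat) : Int)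
            = some (ans + 1, stack.dropLast) := by
          simp only [bodyA, hc0, hpop, hidx, if_neg hc, if_neg hlast]
        rw [PySem.List.pyRange_one_cons hlt, List.foldl_cons, hstep]
        obtain ⟨a, st, hA, hB⟩ := ih rest (pre ++ [c]) (ans + 1) stack.dropLast
          (by simp at hn ⊢; omega)
          (by simp [List.count_append, hc, List.length_dropLast]; omega)
          (by
            intro h
            rw [List.getLast?_concat] at h
            exact absurd (Option.some.injEq .. ▸ h) hc)
          (by
            intro j hj hne2
            have h := hP (j+1) (by simpa using Nat.succ_lt_succ hj) (by simpa using hne2)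
            simp only [List.take_succ_cons, List.count_cons, List.count_append, List.length_append,
              List.length_cons, List.length_nil] at h ⊢
            push_cast at h ⊢
            simp [hc] at h ⊢
            omega)
        refine ⟨a, st, ?_, ?_⟩
        · simp only [List.length_append, List.length_cons, List.length_nil, List.append_assoc,
            List.singleton_append, Nat.cast_add, Nat.cast_one, zero_add] at hA
          simp only [List.length_cons, Nat.cast_add, Nat.cast_one]
          rw [show ((pre.length : Int) + ((rest.length : Int) + 1)) = (pre.length : Int) + 1 + (rest.length : Int) by ring]
          exact hA
        · rw [goB.eq_def]
          have hz : ¬ ((stack.length : Int) = 0) := by omega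
          simp only [if_neg hc, if_neg hz]
          have hdl : ((stack.dropLast.length : Nat) : Int) = (stack.length : Int) - 1 := by
            simp [List.length_dropLast]; omega
          rw [hdl] at hB
          exact hB

-- ===== VERDICT (by name: the statement is the Claim_ definition above) =====
theorem solution_spec : Claim_equal_solution := by
  intro s _ hpre
  show solution s = solution_alt s
  obtain ⟨a, st, hA, hB⟩ := loop_eq s.toList.length s.toList [] 0 [] (le_refl _)
    (by simp) (by simp)
    (by intro j hj hne; have := hpre j hj hne; simpa using this)
  simp only [List.nil_append, List.length_nil, Nat.cast_zero, zero_add] at hA hB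
  simp only [solution, solution_alt]
  rw [hA, hB]
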